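-- pv_equiv track=rewrite | github.com/aggerdom/Terminal-2048 | gamelogic.py | move_blocks
-- ===== SOURCE A (Python) =====
-- import itertools
--
-- def transpose(matrix):
--     return [[matrix[row][col] for row in range(len(matrix))]
--             for col in range(len(matrix))]
--
-- def collapse(row, zeros_on='left'):
--     out = []
--     # ------ Do an inital sort of all zeros to the left
--     # this corresponds to pushing all squares right w/o collapsing them.
--     row = sorted(row[:], key=lambda x: x != 0)
--     cvals = ((value, list(g)) for value, g in itertools.groupby(row))
--     for val, group in cvals:
--         ncollapse, nretain = divmod(len(group), 2)
--         if zeros_on == 'left':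
--             group_items = [0] * ncollapse + [val] * nretain + [val * 2] * ncollapse
--         else:
--             group_items = [val * 2] * ncollapse + [val] * nretain + [0] * ncollapse
--         out.extend(group_items)
--     # Do a final sort to pull all zeros that have been added to the
--     # center to the appropriate side
--     if zeros_on == 'left':
--         out.sort(key=lambda x: x != 0)
--     elif zeros_on == 'right':
--         out.sort(key=lambda x: x == 0)
--     else:
--         raise NotImplementedError("zeros_on argument must be in {'left','right'}")
--     return out
--
-- def move_blocks(state, move):
--     if move == 'right':
--         newstate = [collapse(row) for row in state]
--     elif move == 'left':
--         newstate = [collapse(row, zeros_on='right') for row in state]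
--     elif move == 'down':
--         newstate = transpose([collapse(row) for row in transpose(state)])
--     elif move == 'up':
--         newstate = transpose([collapse(row, zeros_on='right') for row in transpose(state)])
--     else:
--         raise ValueError("'%s' is not a valid argument for move." % move)
--     return newstate
-- ===== SOURCE B (Python) =====
-- def transpose(matrix):
--     return [[matrix[row][col] for row in range(len(matrix))]
--             for col in range(len(matrix))]
--
-- def collapse(row, zeros_on='left'):
--     if zeros_on not in ('left', 'right'):
--         raise NotImplementedError("zeros_on argument must be in {'left','right'}")
--     vals = [x for x in row if x != 0]
--     if zeros_on == 'left':          # pushing right: merge pairs from the right end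
--         vals.reverse()
--     merged = []
--     i = 0
--     while i < len(vals):
--         if i + 1 < len(vals) and vals[i] == vals[i + 1]:
--             merged.append(vals[i] * 2)
--             i += 2
--         else:
--             merged.append(vals[i])
--             i += 1
--     pad = [0] * (len(row) - len(merged))
--     if zeros_on == 'left':
--         merged.reverse()
--         return pad + merged
--     return merged + pad
--
-- def move_blocks(state, move):
--     if move == 'right':
--         newstate = [collapse(row) for row in state]
--     elif move == 'left':
--         newstate = [collapse(row, zeros_on='right') for row in state]
--     elif move == 'down':
--         newstate = transpose([collapse(row) for row in transpose(state)])
--     elif move == 'up':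
--         newstate = transpose([collapse(row, zeros_on='right') for row in transpose(state)])
--     else:
--         raise ValueError("'%s' is not a valid argument for move." % move)
--     return newstate
-- ===== Notes on version B (the rewrite author's own statement) =====
-- stated objective: idiomatic
-- what changed: collapse's sort-zeros/itertools.groupby/divmod/re-sort pipeline is replaced by compacting the row's nonzero tiles and doing one adjacent-pair merge scan in the push direction, then padding with zeros; transpose and the move dispatch are unchanged.
import Mathlib
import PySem

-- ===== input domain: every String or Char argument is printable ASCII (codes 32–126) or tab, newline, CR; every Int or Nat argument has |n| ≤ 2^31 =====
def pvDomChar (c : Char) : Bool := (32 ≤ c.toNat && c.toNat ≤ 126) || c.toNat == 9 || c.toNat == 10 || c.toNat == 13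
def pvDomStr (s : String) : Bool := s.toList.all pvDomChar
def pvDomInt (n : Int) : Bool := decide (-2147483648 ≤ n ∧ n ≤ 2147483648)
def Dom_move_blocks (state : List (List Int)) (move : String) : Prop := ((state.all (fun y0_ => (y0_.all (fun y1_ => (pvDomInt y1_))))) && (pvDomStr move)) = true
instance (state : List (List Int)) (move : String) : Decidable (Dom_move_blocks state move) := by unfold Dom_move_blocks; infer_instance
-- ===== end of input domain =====

-- B replaces collapse's sort/groupby/divmod/re-sort pipeline by a direct scan: compact the
-- nonzero tiles, merge adjacent equal pairs once in the push direction, pad with zeros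
-- (objective: idiomatic). transpose and the move dispatch are kept unchanged.


-- ===== PORT A =====
-- transpose: shared helper, identical in A and B. matrix[row][col] is ported with getD,
-- exact for the in-range indices Pre_ admits (Python raises IndexError otherwise).
def pvTranspose (matrix : List (List Int)) : List (List Int) :=
  (List.range matrix.length).map (fun col =>
    (List.range matrix.length).map (fun row => (matrix.getD row []).getD col 0))

-- itertools.groupby: consecutive runs, peeled from the left (hand port, exact for lists of ints)
def pvGroupby (xs : List Int) : List (Int × List Int) :=
  match xs with
  | [] => []
  | x :: rest =>
      (x, x :: rest.takeWhile (fun y => y == x)) :: pvGroupby (rest.dropWhile (fun y => y == x))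
termination_by xs.length
decreasing_by simp; exact List.length_dropWhile_le _ _

def pvCollapse (row : List Int) (zeros_on : String) : List Int :=
  let row' := PySem.List.sorted row (fun x => x != 0) false
  let out := (pvGroupby row').foldl (fun out vg =>
      let ncollapse := vg.2.length / 2
      let nretain := vg.2.length % 2
      let group_items := if zeros_on = "left" then
          List.replicate ncollapse (0 : Int) ++ List.replicate nretain vg.1 ++ List.replicate ncollapse (vg.1 * 2)
        else
          List.replicate ncollapse (vg.1 * 2) ++ List.replicate nretain vg.1 ++ List.replicate ncollapse (0 : Int)
      out ++ group_items) []
  if zeros_on = "left" then PySem.List.sorted out (fun x => x != 0) false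
  else if zeros_on = "right" then PySem.List.sorted out (fun x => x == 0) false
  else []  -- Python raises NotImplementedError here; move_blocks never reaches this branch

def move_blocks (state : List (List Int)) (move : String) : List (List Int) :=
  if move = "right" then state.map (fun row => pvCollapse row "left")
  else if move = "left" then state.map (fun row => pvCollapse row "right")
  else if move = "down" then pvTranspose ((pvTranspose state).map (fun row => pvCollapse row "left"))
  else if move = "up" then pvTranspose ((pvTranspose state).map (fun row => pvCollapse row "right"))
  else []  -- Python raises ValueError here; excluded by Pre_

-- ===== PORT B =====
-- single left-to-right scan merging adjacent equal pairs (the while loop of Source B)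
def pvMergeScan : List Int → List Int
  | [] => []
  | [x] => [x]
  | x :: y :: rest =>
      if x = y then x * 2 :: pvMergeScan rest else x :: pvMergeScan (y :: rest)

def pvCollapseAlt (row : List Int) (zeros_on : String) : List Int :=
  if zeros_on ≠ "left" ∧ zeros_on ≠ "right" then []  -- Python raises; move_blocks never reaches this
  else
    let vals0 := row.filter (fun x => x != 0)
    let vals := if zeros_on = "left" then vals0.reverse else vals0
    let merged := pvMergeScan vals
    let pad := List.replicate (row.length - merged.length) (0 : Int)
    if zeros_on = "left" then pad ++ merged.reverse else merged ++ pad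

def move_blocks_alt (state : List (List Int)) (move : String) : List (List Int) :=
  if move = "right" then state.map (fun row => pvCollapseAlt row "left")
  else if move = "left" then state.map (fun row => pvCollapseAlt row "right")
  else if move = "down" then pvTranspose ((pvTranspose state).map (fun row => pvCollapseAlt row "left"))
  else if move = "up" then pvTranspose ((pvTranspose state).map (fun row => pvCollapseAlt row "right"))
  else []  -- Python raises ValueError here; excluded by Pre_

-- ===== PRECONDITION & SPEC =====
-- Pre_ excludes exactly the inputs where the Python A raises: an invalid move string
-- (ValueError), and 'up'/'down' on a state with a row shorter than the number of rows
-- (IndexError inside transpose).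
def Pre_move_blocks (state : List (List Int)) (move : String) : Prop :=
  move = "left" ∨ move = "right" ∨
    ((move = "up" ∨ move = "down") ∧ ∀ row ∈ state, state.length ≤ row.length)
instance (state : List (List Int)) (move : String) : Decidable (Pre_move_blocks state move) := by
  unfold Pre_move_blocks; infer_instance

def pvWitness_move_blocks : List (List Int) × String := ([[2, 2, 0], [0, 2, 2], [2, 0, 2]], "up")

def Spec_move_blocks (state : List (List Int)) (move : String) (out : List (List Int)) : Prop := out = move_blocks_alt state move
instance (state : List (List Int)) (move : String) (out : List (List Int)) : Decidable (Spec_move_blocks state move out) := by unfold Spec_move_blocks; infer_instance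

-- ===== CLAIM (what is proved, stated in full; the proofs are below) =====
def Claim_equal_move_blocks : Prop := ∀ (state : List (List Int)) (move : String), Dom_move_blocks state move → Pre_move_blocks state move → Spec_move_blocks state move (move_blocks state move)

-- ===== LEMMAS AND PROOFS =====

-- ---- the stable bool-key sort is "false-key elements, then true-key elements" ----
lemma insertBy_bool {α : Type} (key : α → Bool) (x : α) (f t : List α)
    (hf : ∀ a ∈ f, key a = false) (ht : ∀ a ∈ t, key a = true) :
    PySem.List.insertBy (fun a b => decide (key a < key b)) x (f ++ t)
      = if key x then f ++ t ++ [x] else f ++ x :: t := by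
  induction f with
  | nil =>
    induction t with
    | nil => cases hkx : key x <;> simp [PySem.List.insertBy]
    | cons b t' iht =>
      have hb : key b = true := ht b (by simp)
      cases hkx : key x with
      | false => simp [PySem.List.insertBy, hb, hkx]
      | true =>
        have := iht (fun a ha => ht a (by simp [ha]))
        simp [hkx] at this
        simp [PySem.List.insertBy, hb, hkx, this]
  | cons a f' ihf =>
    have ha : key a = false := hf a (by simp)
    have := ihf (fun b hb => hf b (by simp [hb]))
    cases hkx : key x <;>
      simp [hkx] at this <;>
      simp [PySem.List.insertBy, ha, hkx, this]

lemma foldl_insert_bool {α : Type} (key : α → Bool) (xs f t : List α)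
    (hf : ∀ a ∈ f, key a = false) (ht : ∀ a ∈ t, key a = true) :
    List.foldl (fun acc x => PySem.List.insertBy (fun a b => decide (key a < key b)) x acc) (f ++ t) xs
      = (f ++ xs.filter (fun x => !key x)) ++ (t ++ xs.filter key) := by
  induction xs generalizing f t with
  | nil => simp
  | cons x xs ih =>
    simp only [List.foldl_cons, insertBy_bool key x f t hf ht]
    cases hkx : key x with
    | false =>
      have hx : f ++ x :: t = (f ++ [x]) ++ t := by simp
      have hf' : ∀ a ∈ f ++ [x], key a = false := by
        intro a ha
        rcases List.mem_append.1 ha with h | h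
        · exact hf a h
        · simp at h; simpa [h]
      rw [if_neg (by simp), hx, ih (f ++ [x]) t hf' ht]
      simp [hkx]
    | true =>
      have hx : f ++ t ++ [x] = f ++ (t ++ [x]) := by simp
      have ht' : ∀ a ∈ t ++ [x], key a = true := by
        intro a ha
        rcases List.mem_append.1 ha with h | h
        · exact ht a h
        · simp at h; simpa [h]
      rw [if_pos rfl, hx, ih f (t ++ [x]) hf ht']
      simp [hkx]

lemma sorted_bool {α : Type} (key : α → Bool) (xs : List α) :
    PySem.List.sorted xs key false = xs.filter (fun x => !key x) ++ xs.filter key := by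
  have := foldl_insert_bool key xs [] [] (by simp) (by simp)
  simpa [PySem.List.sorted] using this

-- ---- groupby facts ----
lemma takeWhile_nil_of_head (p : Int → Bool) (ns : List Int) (h : ∀ x ∈ ns, p x = false) :
    ns.takeWhile p = [] := by
  cases ns with
  | nil => rfl
  | cons n t => simp [h n (by simp)]

lemma dropWhile_self_of_head (p : Int → Bool) (ns : List Int) (h : ∀ x ∈ ns, p x = false) :
    ns.dropWhile p = ns := by
  cases ns with
  | nil => rfl
  | cons n t => simp [h n (by simp)]

lemma groupby_flatten (xs : List Int) : (pvGroupby xs).flatMap Prod.snd = xs := by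
  induction xs using pvGroupby.induct with
  | case1 => simp [pvGroupby]
  | case2 x rest ih =>
    rw [pvGroupby]
    simp only [List.flatMap_cons, ih]
    exact congrArg (x :: ·) List.takeWhile_append_dropWhile

lemma groupby_fst_mem (xs : List Int) : ∀ p ∈ pvGroupby xs, p.1 ∈ xs := by
  induction xs using pvGroupby.induct with
  | case1 => simp [pvGroupby]
  | case2 x rest ih =>
    rw [pvGroupby]
    intro p hp
    rcases List.mem_cons.1 hp with h | h
    · simp [h]
    · exact List.mem_cons_of_mem x ((List.dropWhile_sublist _).subset (ih p h))

lemma head?_dropWhile_false {α : Type} (p : α → Bool) (l : List α) (x : α)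
    (h : (l.dropWhile p).head? = some x) : p x = false := by
  induction l with
  | nil => simp at h
  | cons a l ih =>
    rw [List.dropWhile_cons] at h
    by_cases hp : p a
    · simp [hp] at h; exact ih h
    · simp [hp] at h; rw [← h]; simpa using hp

-- groupby of zeros-then-nonzeros
lemma groupby_zero_prefix (z : Nat) (ns : List Int) (h : ∀ x ∈ ns, x ≠ 0) :
    pvGroupby (List.replicate (z + 1) 0 ++ ns)
      = (0, List.replicate (z + 1) 0) :: pvGroupby ns := by
  have hp : ∀ x ∈ ns, ((x : Int) == 0) = false := by
    intro x hx; simpa using h x hx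
  rw [List.replicate_succ, List.cons_append, pvGroupby]
  rw [List.takeWhile_append, List.dropWhile_append]
  simp [takeWhile_nil_of_head _ _ hp, dropWhile_self_of_head _ _ hp]

lemma groupby_replicate (k : Nat) (x : Int) :
    pvGroupby (List.replicate (k + 1) x) = [(x, List.replicate (k + 1) x)] := by
  rw [List.replicate_succ, pvGroupby]
  simp [pvGroupby]

-- groupby peeling the LAST run
lemma groupby_last_run (ys : List Int) (k : Nat) (x : Int) (h : ys.getLast? ≠ some x) :
    pvGroupby (ys ++ List.replicate (k + 1) x)
      = pvGroupby ys ++ [(x, List.replicate (k + 1) x)] := by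
  induction ys using pvGroupby.induct with
  | case1 => simpa [pvGroupby] using groupby_replicate k x
  | case2 y t ih =>
    have hyt : y :: t ++ List.replicate (k + 1) x = y :: (t ++ List.replicate (k + 1) x) := by simp
    rw [hyt, pvGroupby, List.takeWhile_append, List.dropWhile_append]
    by_cases hc : (t.takeWhile (fun z => z == y)).length = t.length
    · have htw : t.takeWhile (fun z => z == y) = t :=
        (List.takeWhile_sublist _).eq_of_length hc
      have hdw : t.dropWhile (fun z => z == y) = [] := by
        have := List.takeWhile_append_dropWhile (p := fun z => z == y) (l := t)
        rw [htw] at this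
        simpa using this
      have hall : ∀ z ∈ t, z = y := by
        intro z hz
        rw [← htw] at hz
        simpa using List.mem_takeWhile_imp hz
      have hyx : y ≠ x := by
        intro hyx
        apply h
        cases t using List.reverseRecOn with
        | nil => simpa using hyx
        | append_singleton t' a =>
          have ha : a = y := hall a (by simp)
          rw [show y :: (t' ++ [a]) = (y :: t') ++ [a] by simp, List.getLast?_concat, ha, hyx]
      have hxk : ∀ z ∈ List.replicate (k + 1) x, ((z == y) : Bool) = false := by
        intro z hz
        rcases List.eq_of_mem_replicate hz with rfl
        simp [Ne.symm hyx]
      rw [if_pos hc, takeWhile_nil_of_head _ _ hxk, if_pos (by simp [hdw]),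
        dropWhile_self_of_head _ _ hxk]
      rw [pvGroupby, htw, hdw, groupby_replicate]
      simp [pvGroupby]
    · have hdwne : t.dropWhile (fun z => z == y) ≠ [] := by
        intro hdw
        apply hc
        have := List.takeWhile_append_dropWhile (p := fun z => z == y) (l := t)
        rw [hdw] at this
        rw [List.append_nil] at this
        exact congrArg List.length this
      have hlast : (t.dropWhile (fun z => z == y)).getLast? ≠ some x := by
        have hsplit := List.takeWhile_append_dropWhile (p := fun z => z == y) (l := t)
        have : (y :: t).getLast? = (t.dropWhile (fun z => z == y)).getLast? := by
          conv_lhs => rw [← hsplit]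
          rw [← List.cons_append]
          exact List.getLast?_append_of_ne_nil _ hdwne
        rw [← this]
        exact h
      rw [if_neg hc, if_neg (by simpa using hdwne), pvGroupby, ih hlast]
      simp

lemma last_run_decomp (xs : List Int) (hne : xs ≠ []) :
    ∃ ys k x, xs = ys ++ List.replicate (k + 1) x ∧ ys.getLast? ≠ some x := by
  induction xs using List.reverseRecOn with
  | nil => exact absurd rfl hne
  | append_singleton t a ih =>
    rcases eq_or_ne t [] with rfl | htne
    · exact ⟨[], 0, a, by simp, by simp⟩
    · obtain ⟨ys, k, x, hdec, hlast⟩ := ih htne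
      rcases eq_or_ne a x with rfl | hax
      · exact ⟨ys, k + 1, a, by simp [hdec, List.replicate_succ'], hlast⟩
      · refine ⟨t, 0, a, by simp, ?_⟩
        rw [hdec, List.getLast?_append_of_ne_nil _ (by simp),
          List.replicate_succ', List.getLast?_concat]
        simpa using Ne.symm hax

-- ---- the merge scan over a run decomposition ----
lemma mergeScan_run (k : Nat) (x : Int) (ys : List Int) (h : ys.head? ≠ some x) :
    pvMergeScan (List.replicate k x ++ ys)
      = List.replicate (k / 2) (x * 2) ++ List.replicate (k % 2) x ++ pvMergeScan ys := by
  induction k using Nat.strong_induction_on with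
  | _ k ih =>
    match k with
    | 0 => simp
    | 1 =>
      cases ys with
      | nil => simp [pvMergeScan]
      | cons y t =>
        have hyx : ¬ (x = y) := by
          intro hxy
          exact h (by simp [hxy])
        simp [pvMergeScan, hyx]
    | (k + 2) =>
      have hrw : List.replicate (k + 2) x ++ ys = x :: x :: (List.replicate k x ++ ys) := by
        simp [List.replicate_succ]
      rw [hrw, pvMergeScan, if_pos rfl, ih k (by omega)]
      have h1 : (k + 2) / 2 = k / 2 + 1 := by omega
      have h2 : (k + 2) % 2 = k % 2 := by omega
      rw [h1, h2, List.replicate_succ]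
      simp

def fRight (p : Int × List Int) : List Int :=
  List.replicate (p.2.length / 2) (p.1 * 2) ++ List.replicate (p.2.length % 2) p.1

def fLeft (p : Int × List Int) : List Int :=
  List.replicate (p.2.length % 2) p.1 ++ List.replicate (p.2.length / 2) (p.1 * 2)

lemma mergeScan_groupby (xs : List Int) :
    pvMergeScan xs = (pvGroupby xs).flatMap fRight := by
  induction xs using pvGroupby.induct with
  | case1 => simp [pvGroupby, pvMergeScan]
  | case2 x rest ih =>
    rw [pvGroupby]
    have htw : rest.takeWhile (fun y => y == x)
        = List.replicate (rest.takeWhile (fun y => y == x)).length x := by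
      apply List.eq_replicate_of_mem
      intro z hz
      simpa using List.mem_takeWhile_imp hz
    have hhd : (rest.dropWhile (fun y => y == x)).head? ≠ some x := by
      intro hc
      have := head?_dropWhile_false _ _ _ hc
      simp at this
    have hxs : x :: rest
        = List.replicate ((rest.takeWhile (fun y => y == x)).length + 1) x
          ++ rest.dropWhile (fun y => y == x) := by
      conv_lhs => rw [← List.takeWhile_append_dropWhile (p := fun y => y == x) (l := rest)]
      rw [List.replicate_succ, ← List.cons_append]
      rw [← htw]
    rw [hxs, mergeScan_run _ _ _ hhd, ih]
    simp [fRight, List.append_assoc]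

lemma mergeScan_rev_rev (xs : List Int) :
    (pvMergeScan xs.reverse).reverse = (pvGroupby xs).flatMap fLeft := by
  generalize hn : xs.length = n
  induction n using Nat.strong_induction_on generalizing xs with
  | _ n ih =>
    rcases eq_or_ne xs [] with rfl | hne
    · simp [pvGroupby, pvMergeScan]
    · obtain ⟨ys, k, x, hdec, hlast⟩ := last_run_decomp xs hne
      have hrev : xs.reverse = List.replicate (k + 1) x ++ ys.reverse := by
        rw [hdec]
        simp
      have hhd : ys.reverse.head? ≠ some x := by
        rw [List.head?_reverse]
        exact hlast
      rw [hrev, mergeScan_run _ _ _ hhd, hdec, groupby_last_run _ _ _ hlast]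
      have hih := ih ys.length (by rw [← hn, hdec]; simp) ys rfl
      simp [fLeft, List.reverse_append, hih, List.append_assoc]

-- ---- A-side: filters of the flattened group items ----
def giLeft (p : Int × List Int) : List Int :=
  List.replicate (p.2.length / 2) (0 : Int) ++ List.replicate (p.2.length % 2) p.1
    ++ List.replicate (p.2.length / 2) (p.1 * 2)

def giRight (p : Int × List Int) : List Int :=
  List.replicate (p.2.length / 2) (p.1 * 2) ++ List.replicate (p.2.length % 2) p.1
    ++ List.replicate (p.2.length / 2) (0 : Int)

lemma filter_nz_giLeft (L : List (Int × List Int)) (h : ∀ p ∈ L, p.1 ≠ 0) :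
    (L.flatMap giLeft).filter (fun x => x != 0) = L.flatMap fLeft := by
  induction L with
  | nil => simp
  | cons p L ih =>
    have h1 : p.1 ≠ 0 := h p (by simp)
    have h2 : p.1 * 2 ≠ 0 := mul_ne_zero h1 two_ne_zero
    simp [giLeft, fLeft, List.filter_append, h1, h2,
      ih (fun q hq => h q (by simp [hq]))]

lemma filter_nz_giRight (L : List (Int × List Int)) (h : ∀ p ∈ L, p.1 ≠ 0) :
    (L.flatMap giRight).filter (fun x => !(x == 0)) = L.flatMap fRight := by
  induction L with
  | nil => simp
  | cons p L ih =>
    have h1 : p.1 ≠ 0 := h p (by simp)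
    have h2 : p.1 * 2 ≠ 0 := mul_ne_zero h1 two_ne_zero
    simp [giRight, fRight, List.filter_append, h1, h2,
      ih (fun q hq => h q (by simp [hq]))]

lemma length_flatMap_giLeft (L : List (Int × List Int)) :
    (L.flatMap giLeft).length = (L.flatMap Prod.snd).length := by
  induction L with
  | nil => rfl
  | cons p L ih => simp [giLeft, ih]; omega

lemma length_flatMap_giRight (L : List (Int × List Int)) :
    (L.flatMap giRight).length = (L.flatMap Prod.snd).length := by
  induction L with
  | nil => rfl
  | cons p L ih => simp [giRight, ih]; omega

-- ---- the two collapse functions agree ----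
lemma filter_eq_replicate_zero (p : Int → Bool) (hp : ∀ b, p b = true → b = 0) (l : List Int) :
    l.filter p = List.replicate (l.filter p).length 0 := by
  apply List.eq_replicate_of_mem
  intro b hb
  exact hp b (List.of_mem_filter hb)

lemma groupby_ns_fst_ne (row : List Int) :
    ∀ p ∈ pvGroupby (row.filter (fun x => x != 0)), p.1 ≠ 0 := by
  intro p hp
  have := groupby_fst_mem _ p hp
  simpa using (List.of_mem_filter this)

lemma sorted_row_decomp (row : List Int) :
    PySem.List.sorted row (fun x => x != 0) false
      = List.replicate (row.filter (fun x => !(x != 0))).length 0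
          ++ row.filter (fun x => x != 0) := by
  rw [sorted_bool]
  congr 1
  exact filter_eq_replicate_zero _ (by intro b hb; simpa using hb) row

-- filter of the flattened group items over the possibly-present zero group
lemma filter_out_left (row : List Int) :
    ((pvGroupby (PySem.List.sorted row (fun x => x != 0) false)).flatMap giLeft).filter (fun x => x != 0)
      = (pvGroupby (row.filter (fun x => x != 0))).flatMap fLeft := by
  rw [sorted_row_decomp]
  have hns : ∀ x ∈ row.filter (fun x => x != 0), x ≠ 0 := by
    intro x hx; simpa using List.of_mem_filter hx
  cases hz : (row.filter (fun x => !(x != 0))).length with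
  | zero => simpa using filter_nz_giLeft _ (groupby_ns_fst_ne row)
  | succ z =>
    rw [groupby_zero_prefix z _ hns]
    simp only [List.flatMap_cons, List.filter_append]
    rw [filter_nz_giLeft _ (groupby_ns_fst_ne row)]
    simp [giLeft]

lemma filter_out_right (row : List Int) :
    ((pvGroupby (PySem.List.sorted row (fun x => x != 0) false)).flatMap giRight).filter (fun x => !(x == 0))
      = (pvGroupby (row.filter (fun x => x != 0))).flatMap fRight := by
  rw [sorted_row_decomp]
  have hns : ∀ x ∈ row.filter (fun x => x != 0), x ≠ 0 := by
    intro x hx; simpa using List.of_mem_filter hx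
  cases hz : (row.filter (fun x => !(x != 0))).length with
  | zero => simpa using filter_nz_giRight _ (groupby_ns_fst_ne row)
  | succ z =>
    rw [groupby_zero_prefix z _ hns]
    simp only [List.flatMap_cons, List.filter_append]
    rw [filter_nz_giRight _ (groupby_ns_fst_ne row)]
    simp [giRight]

lemma length_out_left (row : List Int) :
    ((pvGroupby (PySem.List.sorted row (fun x => x != 0) false)).flatMap giLeft).length = row.length := by
  rw [length_flatMap_giLeft, groupby_flatten, PySem.List.length_sorted]

lemma length_out_right (row : List Int) :
    ((pvGroupby (PySem.List.sorted row (fun x => x != 0) false)).flatMap giRight).length = row.length := by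
  rw [length_flatMap_giRight, groupby_flatten, PySem.List.length_sorted]

lemma pvCollapseAlt_left (row : List Int) :
    pvCollapseAlt row "left"
      = List.replicate (row.length - (pvMergeScan (row.filter (fun x => x != 0)).reverse).length) 0
          ++ (pvMergeScan (row.filter (fun x => x != 0)).reverse).reverse := by
  simp [pvCollapseAlt]

lemma pvCollapseAlt_right (row : List Int) :
    pvCollapseAlt row "right"
      = pvMergeScan (row.filter (fun x => x != 0))
          ++ List.replicate (row.length - (pvMergeScan (row.filter (fun x => x != 0))).length) 0 := by
  simp [pvCollapseAlt]

lemma pvCollapse_left (row : List Int) : pvCollapse row "left" = pvCollapseAlt row "left" := by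
  have hW : pvCollapse row "left"
      = PySem.List.sorted ((pvGroupby (PySem.List.sorted row (fun x => x != 0) false)).flatMap giLeft)
          (fun x => x != 0) false := by
    have hgi : giLeft = fun x2 : Int × List Int =>
        List.replicate (x2.2.length / 2) (0 : Int)
          ++ (List.replicate (x2.2.length % 2) x2.1 ++ List.replicate (x2.2.length / 2) (x2.1 * 2)) := by
      funext p; simp [giLeft, List.append_assoc]
    simp [pvCollapse, hgi, List.flatMap_def]
  have hsplit := List.length_eq_length_filter_add
    (l := (pvGroupby (PySem.List.sorted row (fun x => x != 0) false)).flatMap giLeft)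
    (fun x => x != 0)
  rw [filter_out_left, length_out_left] at hsplit
  have hzc : (((pvGroupby (PySem.List.sorted row (fun x => x != 0) false)).flatMap giLeft).filter
        (fun x => !(x != 0))).length
      = row.length - ((pvGroupby (row.filter (fun x => x != 0))).flatMap fLeft).length := by
    omega
  have hA : pvCollapse row "left"
      = List.replicate (row.length - ((pvGroupby (row.filter (fun x => x != 0))).flatMap fLeft).length) 0
          ++ (pvGroupby (row.filter (fun x => x != 0))).flatMap fLeft := by
    rw [hW, sorted_bool]
    rw [filter_eq_replicate_zero (fun x => !(x != 0)) (by intro b hb; simpa using hb),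
      hzc, filter_out_left]
  have hmerged : (pvMergeScan (row.filter (fun x => x != 0)).reverse).reverse
      = (pvGroupby (row.filter (fun x => x != 0))).flatMap fLeft := mergeScan_rev_rev _
  have hlenm : (pvMergeScan (row.filter (fun x => x != 0)).reverse).length
      = ((pvGroupby (row.filter (fun x => x != 0))).flatMap fLeft).length := by
    rw [← hmerged]; simp
  rw [hA, pvCollapseAlt_left, hmerged, hlenm]

lemma pvCollapse_right (row : List Int) : pvCollapse row "right" = pvCollapseAlt row "right" := by
  have hW : pvCollapse row "right"
      = PySem.List.sorted ((pvGroupby (PySem.List.sorted row (fun x => x != 0) false)).flatMap giRight)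
          (fun x => x == 0) false := by
    have hgi : giRight = fun x2 : Int × List Int =>
        List.replicate (x2.2.length / 2) (x2.1 * 2)
          ++ (List.replicate (x2.2.length % 2) x2.1 ++ List.replicate (x2.2.length / 2) (0 : Int)) := by
      funext p; simp [giRight, List.append_assoc]
    simp [pvCollapse, hgi, List.flatMap_def]
  have hsplit := List.length_eq_length_filter_add
    (l := (pvGroupby (PySem.List.sorted row (fun x => x != 0) false)).flatMap giRight)
    (fun x => !(x == 0))
  have hnn : (((pvGroupby (PySem.List.sorted row (fun x => x != 0) false)).flatMap giRight).filter
        (fun x => !!(x == 0)))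
      = (((pvGroupby (PySem.List.sorted row (fun x => x != 0) false)).flatMap giRight).filter
        (fun x => x == 0)) := by
    simp
  rw [hnn, filter_out_right, length_out_right] at hsplit
  have hzc : (((pvGroupby (PySem.List.sorted row (fun x => x != 0) false)).flatMap giRight).filter
        (fun x => x == 0)).length
      = row.length - ((pvGroupby (row.filter (fun x => x != 0))).flatMap fRight).length := by
    omega
  have hA : pvCollapse row "right"
      = (pvGroupby (row.filter (fun x => x != 0))).flatMap fRight
          ++ List.replicate (row.length - ((pvGroupby (row.filter (fun x => x != 0))).flatMap fRight).length) 0 := by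
    rw [hW, sorted_bool]
    rw [filter_eq_replicate_zero (fun x => x == 0) (by intro b hb; simpa using hb),
      hzc, filter_out_right]
  rw [hA, pvCollapseAlt_right, mergeScan_groupby]

lemma pvCollapse_eq (row : List Int) (zo : String) (hzo : zo = "left" ∨ zo = "right") :
    pvCollapse row zo = pvCollapseAlt row zo := by
  rcases hzo with rfl | rfl
  · exact pvCollapse_left row
  · exact pvCollapse_right row

-- ===== VERDICT (by name: the statement is the Claim_ definition above) =====
theorem move_blocks_spec : Claim_equal_move_blocks := by
  intro state move _ _
  unfold Spec_move_blocks move_blocks move_blocks_alt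
  have hl := fun row => pvCollapse_eq row "left" (Or.inl rfl)
  have hr := fun row => pvCollapse_eq row "right" (Or.inr rfl)
  split_ifs <;> simp only [hl, hr]
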